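-- pv_equiv track=rewrite | github.com/alexesma/DZ_fastapi | dz_fastapi/services/price_control.py | _expand_brand_candidates
-- ===== SOURCE A (Python) =====
-- BRAND_ALIASES = {
--     'HAVAL': ['GREAT WALL'],
--     'GREAT WALL': ['HAVAL'],
-- }
--
-- def _expand_brand_candidates(brands: list[str]) -> list[str]:
--     expanded: list[str] = []
--     seen = set()
--     for brand in brands:
--         candidate = str(brand or '').strip().upper()
--         if not candidate or candidate in seen:
--             continue
--         expanded.append(candidate)
--         seen.add(candidate)
--         for alias in BRAND_ALIASES.get(candidate, []):
--             alias_norm = str(alias or '').strip().upper()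
--             if alias_norm and alias_norm not in seen:
--                 expanded.append(alias_norm)
--                 seen.add(alias_norm)
--     return expanded
-- ===== SOURCE B (Python) =====
-- BRAND_ALIASES = {
--     'HAVAL': ['GREAT WALL'],
--     'GREAT WALL': ['HAVAL'],
-- }
--
--
-- def _expand_brand_candidates(brands: list[str]) -> list[str]:
--     # Phase 1: flatten — every normalized brand followed by its normalized aliases, no dedup.
--     flat: list[str] = []
--     for brand in brands:
--         norm = str(brand or '').strip().upper()
--         flat.append(norm)
--         for alias in BRAND_ALIASES.get(norm, []):
--             flat.append(str(alias or '').strip().upper())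
--     # Phase 2: order-preserving dedup, dropping empties.
--     result: list[str] = []
--     seen = set()
--     for cand in flat:
--         if cand and cand not in seen:
--             result.append(cand)
--             seen.add(cand)
--     return result
-- ===== Notes on version B (the rewrite author's own statement) =====
-- stated objective: alternative
-- what changed: A's single interleaved pass (dedup decisions made while expanding, aliases skipped when the brand was seen) is split into a build phase producing the full flattened brand+alias stream and a separate order-preserving dedup pass over that stream.
import Mathlib
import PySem

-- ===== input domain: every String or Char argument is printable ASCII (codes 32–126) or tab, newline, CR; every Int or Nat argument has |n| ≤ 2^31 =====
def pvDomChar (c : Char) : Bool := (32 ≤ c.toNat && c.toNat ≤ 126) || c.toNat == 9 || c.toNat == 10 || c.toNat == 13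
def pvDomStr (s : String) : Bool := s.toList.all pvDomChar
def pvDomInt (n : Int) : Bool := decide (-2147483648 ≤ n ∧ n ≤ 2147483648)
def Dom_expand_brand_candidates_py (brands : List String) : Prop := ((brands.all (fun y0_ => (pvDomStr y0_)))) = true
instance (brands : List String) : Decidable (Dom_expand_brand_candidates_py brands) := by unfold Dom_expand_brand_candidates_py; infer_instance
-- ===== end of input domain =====

-- B splits A's single interleaved expand-while-dedup pass into a flatten phase and a separate
-- order-preserving dedup phase; same output proved for every input (objective: alternative).

-- ===== PORT A =====
-- candidate = str(brand or '').strip().upper(); on a str argument 'str(brand or '')' is brand itself.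
def pvNorm (s : String) : String := PySem.Str.upper (PySem.Str.strip s)

def pvBrandAliases : PySem.Dict String (List String) :=
  PySem.Dict.mk [("HAVAL", ["GREAT WALL"]), ("GREAT WALL", ["HAVAL"])]

-- the body of A's outer 'for brand in brands' loop
def pvStepA (st : List String × PySem.Set String) (brand : String) :
    List String × PySem.Set String :=
  let candidate := pvNorm brand
  if candidate = "" ∨ PySem.Set.contains st.2 candidate = true then st
  else
    (PySem.Dict.getD pvBrandAliases candidate []).foldl
      (fun st al =>
        let aliasNorm := pvNorm al
        if aliasNorm ≠ "" ∧ ¬ PySem.Set.contains st.2 aliasNorm = true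
        then (st.1 ++ [aliasNorm], PySem.Set.add st.2 aliasNorm) else st)
      (st.1 ++ [candidate], PySem.Set.add st.2 candidate)

def expand_brand_candidates_py (brands : List String) : List String :=
  (brands.foldl pvStepA ([], PySem.Set.empty)).1

-- ===== PORT B =====
-- phase 1 of Source B: flatten each normalized brand followed by its normalized aliases
def pvBuildStep (acc : List String) (brand : String) : List String :=
  let norm := pvNorm brand
  (PySem.Dict.getD pvBrandAliases norm []).foldl
    (fun acc al => acc ++ [pvNorm al]) (acc ++ [norm])

-- phase 2 of Source B: order-preserving dedup dropping empties
def pvDedupStep (st : List String × PySem.Set String) (cand : String) :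
    List String × PySem.Set String :=
  if cand ≠ "" ∧ ¬ PySem.Set.contains st.2 cand = true
  then (st.1 ++ [cand], PySem.Set.add st.2 cand) else st

def expand_brand_candidates_py_alt (brands : List String) : List String :=
  let flat := brands.foldl pvBuildStep []
  (flat.foldl pvDedupStep ([], PySem.Set.empty)).1

-- ===== PRECONDITION & SPEC =====
def Spec_expand_brand_candidates_py (brands : List String) (out : List String) : Prop := out = expand_brand_candidates_py_alt brands
instance (brands : List String) (out : List String) : Decidable (Spec_expand_brand_candidates_py brands out) := by unfold Spec_expand_brand_candidates_py; infer_instance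

-- ===== CLAIM (what is proved, stated in full; the proofs are below) =====
def Claim_equal_expand_brand_candidates_py : Prop := ∀ (brands : List String), Dom_expand_brand_candidates_py brands → Spec_expand_brand_candidates_py brands (expand_brand_candidates_py brands)

-- ===== LEMMAS AND PROOFS =====

-- the block of flat entries one brand contributes in B, as a function of the normalized name
def pvBlock (c : String) : List String :=
  c :: (PySem.Dict.getD pvBrandAliases c []).map pvNorm

-- A's loop body as a function of the already-normalized candidate
def pvBodyA (st : List String × PySem.Set String) (c : String) :
    List String × PySem.Set String :=
  if c = "" ∨ PySem.Set.contains st.2 c = true then st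
  else
    (PySem.Dict.getD pvBrandAliases c []).foldl
      (fun st al =>
        let aliasNorm := pvNorm al
        if aliasNorm ≠ "" ∧ ¬ PySem.Set.contains st.2 aliasNorm = true
        then (st.1 ++ [aliasNorm], PySem.Set.add st.2 aliasNorm) else st)
      (st.1 ++ [c], PySem.Set.add st.2 c)

theorem pvStepA_eq (st : List String × PySem.Set String) (b : String) :
    pvStepA st b = pvBodyA st (pvNorm b) := by unfold pvStepA pvBodyA; rfl

theorem pvGetD_other (c : String) (h1 : c ≠ "HAVAL") (h2 : c ≠ "GREAT WALL") :
    PySem.Dict.getD pvBrandAliases c [] = [] := by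
  simp [pvBrandAliases, PySem.Dict.getD, PySem.Dict.get?, Ne.symm h1, Ne.symm h2]

-- the invariant A's seen-set maintains: the two aliased names enter it together
def pvInv (seen : PySem.Set String) : Prop :=
  "HAVAL" ∈ seen ↔ "GREAT WALL" ∈ seen

theorem pvStep_main (c : String) (st : List String × PySem.Set String) (h : pvInv st.2) :
    List.foldl pvDedupStep st (pvBlock c) = pvBodyA st c ∧ pvInv (pvBodyA st c).2 := by
  by_cases hH : c = "HAVAL"
  · subst hH
    have eb : pvBlock "HAVAL" = ["HAVAL", "GREAT WALL"] := by decide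
    have eg : PySem.Dict.getD pvBrandAliases "HAVAL" [] = ["GREAT WALL"] := by decide
    have en : pvNorm "GREAT WALL" = "GREAT WALL" := by decide
    by_cases hm : "HAVAL" ∈ st.2
    · have hg : "GREAT WALL" ∈ st.2 := h.mp hm
      refine ⟨by simp [eb, pvDedupStep, pvBodyA, hm, hg], ?_⟩
      simpa [pvBodyA, hm] using h
    · have hg : "GREAT WALL" ∉ st.2 := fun hx => hm (h.mpr hx)
      refine ⟨by simp [eb, eg, en, pvDedupStep, pvBodyA, hm, hg], ?_⟩
      simp [pvInv, pvBodyA, eg, en, hm, hg]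
  · by_cases hG : c = "GREAT WALL"
    · subst hG
      have eb : pvBlock "GREAT WALL" = ["GREAT WALL", "HAVAL"] := by decide
      have eg : PySem.Dict.getD pvBrandAliases "GREAT WALL" [] = ["HAVAL"] := by decide
      have en : pvNorm "HAVAL" = "HAVAL" := by decide
      by_cases hm : "GREAT WALL" ∈ st.2
      · have hg : "HAVAL" ∈ st.2 := h.mpr hm
        refine ⟨by simp [eb, pvDedupStep, pvBodyA, hm, hg], ?_⟩
        simpa [pvBodyA, hm] using h
      · have hg : "HAVAL" ∉ st.2 := fun hx => hm (h.mp hx)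
        refine ⟨by simp [eb, eg, en, pvDedupStep, pvBodyA, hm, hg], ?_⟩
        simp [pvInv, pvBodyA, eg, en, hm, hg]
    · have eg : PySem.Dict.getD pvBrandAliases c [] = [] := pvGetD_other c hH hG
      have eb : pvBlock c = [c] := by simp [pvBlock, eg]
      by_cases hc0 : c = ""
      · subst hc0
        refine ⟨by simp [eb, pvDedupStep, pvBodyA], ?_⟩
        simpa [pvBodyA] using h
      · by_cases hm : c ∈ st.2
        · refine ⟨by simp [eb, pvDedupStep, pvBodyA, hc0, hm], ?_⟩
          simpa [pvBodyA, hm] using h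
        · refine ⟨by simp [eb, eg, pvDedupStep, pvBodyA, hc0, hm], ?_⟩
          simp only [pvInv, pvBodyA, eg, hc0, List.foldl_nil]
          simp [Ne.symm hH, Ne.symm hG, hm]
          exact h

theorem pvFlat_eq (brands : List String) (acc : List String) :
    brands.foldl pvBuildStep acc = acc ++ brands.flatMap (fun b => pvBlock (pvNorm b)) := by
  induction brands generalizing acc with
  | nil => simp
  | cons b bs ih =>
    have hstep : pvBuildStep acc b = acc ++ pvBlock (pvNorm b) := by
      unfold pvBuildStep
      rw [PySem.List.foldl_append_singleton_eq_map]
      simp [pvBlock]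
    simp [ih, hstep]

theorem pvMain (brands : List String) (st : List String × PySem.Set String) (h : pvInv st.2) :
    List.foldl pvDedupStep st (brands.flatMap (fun b => pvBlock (pvNorm b))) =
      brands.foldl pvStepA st := by
  induction brands generalizing st with
  | nil => simp
  | cons b bs ih =>
    obtain ⟨he, hinv⟩ := pvStep_main (pvNorm b) st h
    simp only [List.flatMap_cons, List.foldl_append, List.foldl_cons]
    rw [he, ← pvStepA_eq]
    exact ih _ (by rw [pvStepA_eq]; exact hinv)

-- ===== VERDICT (by name: the statement is the Claim_ definition above) =====
theorem expand_brand_candidates_py_spec : Claim_equal_expand_brand_candidates_py := by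
  intro brands _
  show (brands.foldl pvStepA ([], PySem.Set.empty)).1 =
    ((brands.foldl pvBuildStep []).foldl pvDedupStep ([], PySem.Set.empty)).1
  rw [pvFlat_eq brands [], List.nil_append, pvMain brands ([], PySem.Set.empty) (by simp [pvInv, PySem.Set.empty])]
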